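-- pv_equiv track=rewrite | github.com/factchecking2023/factchecking2023 | utils.py | get_limit_text
-- ===== SOURCE A (Python) =====
-- def get_limit_text(text, limit = 512):
--     cnt = 0
--     for i in range(len(text)):
--         if text[i] in ['\t', '\n', ' ']:
--             cnt += 1
--         if cnt >= limit:
--             return text[:i]
--     return text
-- ===== SOURCE B (Python) =====
-- def get_limit_text(text, limit = 512):
--     positions = [i for i, c in enumerate(text) if c in ('\t', '\n', ' ')]
--     if limit <= 0:
--         return text[:0]
--     if len(positions) < limit:
--         return text
--     return text[:positions[limit - 1]]
-- ===== Notes on version B (the rewrite author's own statement) =====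
-- stated objective: alternative
-- what changed: Replaces A's running-counter scan with early return by a precomputed list of whitespace positions followed by branch-and-lookup (select instead of count).
import Mathlib
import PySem

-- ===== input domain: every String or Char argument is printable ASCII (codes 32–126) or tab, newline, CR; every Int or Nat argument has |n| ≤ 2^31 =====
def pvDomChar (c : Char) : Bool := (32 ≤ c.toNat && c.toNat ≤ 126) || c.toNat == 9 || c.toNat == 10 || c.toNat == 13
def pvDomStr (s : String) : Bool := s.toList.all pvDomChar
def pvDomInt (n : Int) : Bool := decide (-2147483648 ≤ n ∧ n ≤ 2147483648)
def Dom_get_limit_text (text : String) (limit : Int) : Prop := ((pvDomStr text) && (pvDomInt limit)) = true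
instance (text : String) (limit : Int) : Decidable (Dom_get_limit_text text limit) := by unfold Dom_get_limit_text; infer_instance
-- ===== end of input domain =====

-- B replaces A's running-counter scan (early return at the limit-th whitespace) by a precomputed
-- whitespace-position table with a single branch-and-lookup; same cost, different decomposition.

-- ===== PORT A =====
def pvWs (c : Char) : Bool := c == '\t' || c == '\n' || c == ' '

def pvLoopA (text : String) (limit : Int) : List Char → Nat → Int → String
  | [], _, _ => text
  | c :: rest, i, cnt =>
    let cnt' := if pvWs c then cnt + 1 else cnt
    if limit ≤ cnt' then PySem.Str.slice text none (some (i : Int))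
    else pvLoopA text limit rest (i + 1) cnt'

def get_limit_text (text : String) (limit : Int) : String :=
  pvLoopA text limit text.toList 0 0


-- ===== PORT B =====
def pvPositions (cs : List Char) : List Int :=
  ((PySem.List.enumerate cs).filter (fun p => pvWs p.2)).map Prod.fst

def get_limit_text_alt (text : String) (limit : Int) : String :=
  let positions := pvPositions text.toList
  if limit ≤ 0 then PySem.Str.slice text none (some 0)
  else if (positions.length : Int) < limit then text
  else PySem.Str.slice text none (some ((PySem.List.pyGet? positions (limit - 1)).getD 0))


-- ===== PRECONDITION & SPEC =====
def Spec_get_limit_text (text : String) (limit : Int) (out : String) : Prop := out = get_limit_text_alt text limit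
instance (text : String) (limit : Int) (out : String) : Decidable (Spec_get_limit_text text limit out) := by unfold Spec_get_limit_text; infer_instance

-- ===== CLAIM (what is proved, stated in full; the proofs are below) =====
def Claim_equal_get_limit_text : Prop := ∀ (text : String) (limit : Int), Dom_get_limit_text text limit → Spec_get_limit_text text limit (get_limit_text text limit)

-- ===== LEMMAS AND PROOFS =====


-- recursive characterisation of the whitespace-position table, used by the proofs
def pvPos : List Char → Int → List Int
  | [], _ => []
  | c :: rest, i => if pvWs c then i :: pvPos rest (i + 1) else pvPos rest (i + 1)

theorem pvPositions_eq (cs : List Char) (s : Int) :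
    ((PySem.List.enumerate cs s).filter (fun p => pvWs p.2)).map Prod.fst = pvPos cs s := by
  induction cs generalizing s with
  | nil => simp [PySem.List.enumerate_nil, pvPos]
  | cons c rest ih =>
    simp only [PySem.List.enumerate_cons, List.filter_cons, pvPos]
    by_cases h : pvWs c <;> simp [h, ih]

theorem pvGet_cons_succ {x : Int} {xs : List Int} {k : Int} (hk : 0 ≤ k) :
    PySem.List.pyGet? (x :: xs) (k + 1) = PySem.List.pyGet? xs k := by
  simp only [PySem.List.pyGet?, PySem.List.pyIdx?, List.length_cons]
  rw [if_pos (by omega : (0:Int) ≤ k + 1), if_pos hk]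
  by_cases h : k < (xs.length : Int)
  · rw [if_pos (by push_cast; omega), if_pos h]
    have ht : (k + 1).toNat = k.toNat + 1 := by omega
    simp [ht]
  · rw [if_neg (by push_cast; omega), if_neg h]
    simp

theorem pvLoopA_eq (text : String) (limit : Int) (cs : List Char) (i : Nat) (cnt : Int)
    (h : cnt < limit) :
    pvLoopA text limit cs i cnt =
      (if ((pvPos cs (i : Int)).length : Int) < limit - cnt then text
       else PySem.Str.slice text none
         (some ((PySem.List.pyGet? (pvPos cs (i : Int)) (limit - cnt - 1)).getD 0))) := by
  induction cs generalizing i cnt with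
  | nil => simp only [pvLoopA, pvPos]; rw [if_pos (by simp; omega)]
  | cons c rest ih =>
    have hcast : ((i + 1 : Nat) : Int) = (i : Int) + 1 := by push_cast; ring
    by_cases hw : pvWs c
    · simp only [pvLoopA, pvPos, hw, if_true]
      by_cases hl : limit ≤ cnt + 1
      · rw [if_pos hl]
        have hlen : ¬ ((((i : Int) :: pvPos rest ((i : Int) + 1)).length : Int) < limit - cnt) := by
          simp only [List.length_cons]; push_cast; omega
        rw [if_neg hlen]
        have hidx : limit - cnt - 1 = 0 := by omega
        rw [hidx]
        simp [PySem.List.pyGet?, PySem.List.pyIdx?]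
      · rw [if_neg hl, ih (i + 1) (cnt + 1) (by omega), hcast]
        have hlen : ((((i : Int) :: pvPos rest ((i : Int) + 1)).length : Int) < limit - cnt) ↔
            ((pvPos rest ((i : Int) + 1)).length : Int) < limit - (cnt + 1) := by
          simp only [List.length_cons]; push_cast; omega
        by_cases h2 : ((pvPos rest ((i : Int) + 1)).length : Int) < limit - (cnt + 1)
        · rw [if_pos h2, if_pos (hlen.mpr h2)]
        · rw [if_neg h2, if_neg (fun hc => h2 (hlen.mp hc))]
          have hidx : limit - cnt - 1 = (limit - (cnt + 1) - 1) + 1 := by ring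
          rw [hidx, pvGet_cons_succ (by omega)]
    · have hw' : pvWs c = false := by simpa using hw
      simp only [pvLoopA, pvPos, hw', Bool.false_eq_true, if_false]
      rw [if_neg (by omega : ¬ limit ≤ cnt), ih (i + 1) cnt h, hcast]

-- ===== VERDICT (by name: the statement is the Claim_ definition above) =====
theorem get_limit_text_spec : Claim_equal_get_limit_text := by
  intro text limit _
  unfold Spec_get_limit_text get_limit_text get_limit_text_alt pvPositions
  rw [pvPositions_eq]
  by_cases hl : limit ≤ 0
  · rw [if_pos hl]
    cases hcs : text.toList with
    | nil =>
      have htext : text = "" := by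
        have := congrArg String.ofList hcs
        simpa using this
      subst htext
      simp only [pvLoopA]
      decide
    | cons c rest =>
      simp only [pvLoopA]
      rw [if_pos (by by_cases h : pvWs c <;> simp [h] <;> omega)]
      norm_num
  · rw [if_neg hl]
    rw [pvLoopA_eq text limit text.toList 0 0 (by omega)]
    norm_num
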